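-- pv_equiv track=rewrite | github.com/thepratholic/Competitive-Programming | LeetCode/Weekly Contest 494/Construct Uniform Parity Array II.py | uniformArray
-- ===== SOURCE A (Python) =====
-- def uniformArray(nums1: list[int]) -> bool:
--     n = len(nums1)
--
--     odd, even = 0, 0
--
--     for x in nums1:
--         if x & 1: odd += 1
--         else:
--             even += 1
--
--     if (odd == n) or (odd == 0):
--         return True
--
--     mn = min(nums1)
--     return True if mn & 1 else False
-- ===== SOURCE B (Python) =====
-- def uniformArray(nums1: list[int]) -> bool:
--     # Empty array: trivially uniform.
--     if not nums1:
--         return True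
--     # If the minimum is odd, the answer is True whether the array is
--     # all-odd (uniform) or mixed (min parity is odd); no counting needed.
--     if min(nums1) & 1:
--         return True
--     # Minimum is even: the answer is True exactly when every element is even.
--     return all(x & 1 == 0 for x in nums1)
-- ===== Notes on version B (the rewrite author's own statement) =====
-- stated objective: faster
-- what changed: Drops A's parity counting entirely: B takes the minimum first and short-circuits to True when it is odd (covering both all-odd and mixed cases), and only when the minimum is even checks that every element is even; the interpreted counting loop is replaced by short-circuiting C built-ins (min/all).
import Mathlib
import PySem

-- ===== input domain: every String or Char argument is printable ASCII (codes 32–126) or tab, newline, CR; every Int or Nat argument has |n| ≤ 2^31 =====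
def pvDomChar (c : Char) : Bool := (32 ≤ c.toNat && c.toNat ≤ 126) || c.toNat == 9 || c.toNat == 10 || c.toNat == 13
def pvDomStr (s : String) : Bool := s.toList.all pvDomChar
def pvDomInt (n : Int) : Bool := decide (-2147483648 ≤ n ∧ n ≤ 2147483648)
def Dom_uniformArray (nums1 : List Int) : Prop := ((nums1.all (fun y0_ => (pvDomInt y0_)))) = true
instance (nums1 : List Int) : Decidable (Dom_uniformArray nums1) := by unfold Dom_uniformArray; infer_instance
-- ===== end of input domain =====

-- B takes the minimum first and short-circuits when it is odd, checking all-even only otherwise; same O(n) cost.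
-- ===== PORT A =====
def uniformArray (nums1 : List Int) : Bool :=
  let n : Int := nums1.length
  let oe : Int × Int := nums1.foldl
    (fun (s : Int × Int) x =>
      if PySem.Int.band x 1 ≠ 0 then (s.1 + 1, s.2) else (s.1, s.2 + 1)) (0, 0)
  if oe.1 = n ∨ oe.1 = 0 then true
  else
    match PySem.List.min? nums1 (fun y => y) with
    | some mn => if PySem.Int.band mn 1 ≠ 0 then true else false
    | none => false

-- ===== PORT B =====
def uniformArray_alt (nums1 : List Int) : Bool :=
  if nums1 = [] then true
  else
    match PySem.List.min? nums1 (fun y => y) with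
    | some mn =>
        if PySem.Int.band mn 1 ≠ 0 then true
        else nums1.all (fun x => PySem.Int.band x 1 == 0)
    | none => true

-- ===== PRECONDITION & SPEC =====
def Spec_uniformArray (nums1 : List Int) (out : Bool) : Prop := out = uniformArray_alt nums1
instance (nums1 : List Int) (out : Bool) : Decidable (Spec_uniformArray nums1 out) := by unfold Spec_uniformArray; infer_instance

-- ===== CLAIM (what is proved, stated in full; the proofs are below) =====
def Claim_equal_uniformArray : Prop := ∀ (nums1 : List Int), Dom_uniformArray nums1 → Spec_uniformArray nums1 (uniformArray nums1)

-- ===== LEMMAS AND PROOFS =====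

-- the counter loop of A counts parities
theorem pv_foldl_count (xs : List Int) (o e : Int) :
    xs.foldl (fun (s : Int × Int) x =>
      if PySem.Int.band x 1 ≠ 0 then (s.1 + 1, s.2) else (s.1, s.2 + 1)) (o, e)
    = (o + (xs.countP (fun x => decide (PySem.Int.band x 1 ≠ 0)) : Int),
       e + (xs.countP (fun x => decide (PySem.Int.band x 1 = 0)) : Int)) := by
  induction xs generalizing o e with
  | nil => simp
  | cons a t ih =>
    simp only [List.foldl_cons]
    by_cases h : PySem.Int.band a 1 = 0
    · rw [if_neg (by simp [h]), ih, Prod.ext_iff]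
      simp [h]
      all_goals omega
    · rw [if_pos h, ih, Prod.ext_iff]
      simp [h]
      all_goals omega

-- ===== VERDICT (by name: the statement is the Claim_ definition above) =====
theorem uniformArray_spec : Claim_equal_uniformArray := by
  intro nums1 _
  unfold Spec_uniformArray uniformArray uniformArray_alt
  cases nums1 with
  | nil => simp
  | cons a t =>
    simp only [pv_foldl_count, zero_add]
    have hne : (a :: t : List Int) ≠ [] := by simp
    obtain ⟨mn, hmn⟩ : ∃ m, PySem.List.min? (a :: t) (fun y => y) = some m := by
      cases h : PySem.List.min? (a :: t) (fun y => y) with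
      | none => exact absurd ((PySem.List.min?_eq_none_iff _ _).mp h) hne
      | some m => exact ⟨m, rfl⟩
    have hmem := PySem.List.min?_mem hmn
    have hmin := PySem.List.min?_isMin hmn
    simp only [hmn, if_neg hne]
    by_cases hodd : PySem.Int.band mn 1 ≠ 0
    · -- minimum odd: both inner branches are true, and A's outer if has true on both sides
      simp only [if_pos hodd]
      split <;> rfl
    · -- minimum even
      rw [if_neg hodd, if_neg hodd]
      by_cases hall : ∀ x ∈ (a :: t), PySem.Int.band x 1 = 0
      · -- all even
        have hc0 : (a :: t).countP (fun x => decide (PySem.Int.band x 1 ≠ 0)) = 0 := by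
          rw [List.countP_eq_zero]; intro x hx; simp [hall x hx]
        rw [if_pos (Or.inr (by exact_mod_cast hc0))]
        symm
        simp only [List.all_eq_true, beq_iff_eq]
        intro x hx; exact hall x hx
      · -- some odd element, minimum even: both sides false
        push_neg at hall
        obtain ⟨w, hw, hwodd⟩ := hall
        have hpos : 0 < (a :: t).countP (fun x => decide (PySem.Int.band x 1 ≠ 0)) :=
          List.countP_pos_iff.mpr ⟨w, hw, by simpa using hwodd⟩
        have hlt : (a :: t).countP (fun x => decide (PySem.Int.band x 1 ≠ 0))
            < (a :: t).length := by
          rcases Nat.lt_or_ge ((a :: t).countP (fun x => decide (PySem.Int.band x 1 ≠ 0)))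
              (a :: t).length with h | h
          · exact h
          · exfalso
            have heq := Nat.le_antisymm
              (List.countP_le_length (p := fun x => decide (PySem.Int.band x 1 ≠ 0))) h
            rw [List.countP_eq_length] at heq
            have := heq mn hmem
            simp at this
            exact hodd this
        rw [if_neg (by push_neg; exact ⟨by exact_mod_cast Nat.ne_of_lt hlt,
            by exact_mod_cast hpos.ne'⟩)]
        symm
        simp only [List.all_eq_false, beq_iff_eq]
        exact ⟨w, hw, hwodd⟩
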